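-- pv_equiv track=rewrite | github.com/Tharit2000/ITCS323-Computer-Data-Communication | Programming Assignment: Error code/Checksum.py | Checksum_check
-- ===== SOURCE A (Python) =====
-- def Checksum_check(codeword, word_size, num_blocks):
--     '''
--     :param codeword: codeword
--     :param word_size: Size of each separated word (word_size)
--     :param num_blocks: Number of word blocks used for one set of checksum operation (num_blocks)
--     :return: Validity of codeword
--     '''
--     temp = [codeword[i:i+word_size] for i in range(0, len(codeword), word_size)]
--     sum = '0'*word_size
--     # add
--     for data in temp:
--         sum = bin(int(sum,2) + int(data,2))
--     sum = sum[2:]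
--     if len(sum) > word_size:
--         carry = sum[:len(sum)-word_size]
--         sum = sum[len(sum)-word_size:]
--         sum = bin(int(sum,2) + int(carry,2))
--         sum = sum[2:]
--     while len(sum) < word_size:
--         sum = '0' + str(sum)
--     # complementing sum
--     complement = ''
--     for bit in sum:
--         if bit == '1':
--             complement += '0' # change 1 to 0
--         else:
--             complement += '1' # change 0 to 1
--
--     # check
--     if complement == '0'*word_size:
--         return 'Valid'
--     else:
--         return 'Invalid'
-- ===== SOURCE B (Python) =====
-- def Checksum_check(codeword, word_size, num_blocks):
--     # Single streaming pass over the bits: build each word on the fly with a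
--     # (cur, pos) accumulator; no slicing, no bin()/string arithmetic, no complement pass.
--     total = 0
--     cur = 0
--     pos = 0
--     for ch in codeword:
--         cur = cur * 2 + int(ch, 2)
--         pos += 1
--         if pos == word_size:
--             total += cur
--             cur = 0
--             pos = 0
--     if pos > 0:
--         total += cur
--     mask = (1 << word_size) - 1
--     if total > mask:
--         total = (total >> word_size) + (total & mask)
--     return 'Valid' if total == mask else 'Invalid'
-- ===== Notes on version B (the rewrite author's own statement) =====
-- stated objective: alternative
-- what changed: B streams over the codeword character by character with a (total, cur, pos) accumulator that assembles each word on the fly, then does one arithmetic carry fold and a mask comparison - no slicing into chunk strings, no bin()/int() string round-trips, no padding and no per-bit complement pass as in A.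
-- outside the precondition, e.g. on Checksum_check('+1', 2, 1): A returns 'Invalid', B raises ValueError
import Mathlib
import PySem

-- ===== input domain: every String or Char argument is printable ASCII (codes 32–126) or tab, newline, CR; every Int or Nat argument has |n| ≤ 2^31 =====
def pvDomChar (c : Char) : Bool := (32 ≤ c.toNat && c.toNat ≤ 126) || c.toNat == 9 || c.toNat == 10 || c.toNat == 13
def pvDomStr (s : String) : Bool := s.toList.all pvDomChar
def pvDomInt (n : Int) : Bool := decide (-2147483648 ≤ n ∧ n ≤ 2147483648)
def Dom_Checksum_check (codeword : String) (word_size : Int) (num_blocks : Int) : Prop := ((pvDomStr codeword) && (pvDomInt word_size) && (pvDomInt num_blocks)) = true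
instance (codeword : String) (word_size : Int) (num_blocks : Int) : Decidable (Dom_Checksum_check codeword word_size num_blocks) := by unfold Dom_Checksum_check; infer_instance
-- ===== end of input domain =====

-- B replaces A's staged string passes (chunk slicing, bin()/int() round-trips, carry slicing,
-- padding, per-bit complement loop) by one streaming pass over the characters with a
-- (total, cur, pos) accumulator plus an arithmetic carry fold; objective: alternative.


-- ===== PORT A =====
-- int(s, 2): exact on the strings A feeds it under Pre_ (binary digits, possibly after a '0b'
-- prefix produced by bin(); '0' and 'b' both contribute digit 0, which is Python's value too).
def pvIntBin (s : List Char) : Int :=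
  s.foldl (fun a c => 2 * a + (if c = '1' then 1 else 0)) 0

-- bin(n)[2:] for a natural number: its binary digits, most significant first ('0' for n = 0).
def pvBin (n : Nat) : List Char :=
  if h : n < 2 then [if n = 1 then '1' else '0']
  else pvBin (n / 2) ++ [if n % 2 = 1 then '1' else '0']
decreasing_by exact Nat.div_lt_self (by omega) (by omega)

-- the "while len(sum) < word_size: sum = '0' + sum" loop, run its exact number of iterations
def pvPad : Nat → List Char → List Char
  | 0, s => s
  | k + 1, s => pvPad k ('0' :: s)

def Checksum_check (codeword : String) (word_size : Int) (num_blocks : Int) : String :=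
  let cs := codeword.toList
  let temp := (PySem.List.pyRange 0 cs.length word_size).map
    (fun i => PySem.List.slice cs (some i) (some (i + word_size)))
  let sum0 := List.replicate word_size.toNat '0'
  let sum1 := temp.foldl
    (fun s data => '0' :: 'b' :: pvBin (pvIntBin s + pvIntBin data).toNat) sum0
  let sum2 := PySem.List.slice sum1 (some 2) none
  let sum3 :=
    if (sum2.length : Int) > word_size then
      let carry := PySem.List.slice sum2 none (some ((sum2.length : Int) - word_size))
      let low := PySem.List.slice sum2 (some ((sum2.length : Int) - word_size)) none
      PySem.List.slice ('0' :: 'b' :: pvBin (pvIntBin low + pvIntBin carry).toNat) (some 2) none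
    else sum2
  let sum4 := pvPad (word_size.toNat - sum3.length) sum3
  let complement := sum4.foldl (fun acc b => acc ++ [if b = '1' then '0' else '1']) []
  if complement = List.replicate word_size.toNat '0' then "Valid" else "Invalid"

-- ===== PORT B =====
-- B's loop body: state (total, cur, pos); 'cur = cur * 2 + int(ch, 2)' (exact: ch is '0'/'1'
-- under Pre_), 'pos += 1', 'if pos == word_size'.
def pvBStep (word_size : Int) (s : Int × Int × Int) (ch : Char) : Int × Int × Int :=
  let cur := s.2.1 * 2 + pvIntBin [ch]
  let pos := s.2.2 + 1
  if pos = word_size then (s.1 + cur, 0, 0) else (s.1, cur, pos)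

def Checksum_check_alt (codeword : String) (word_size : Int) (num_blocks : Int) : String :=
  let st := codeword.toList.foldl (pvBStep word_size) (0, 0, 0)
  let total := if st.2.2 > 0 then st.1 + st.2.1 else st.1
  -- mask = (1 << word_size) - 1; word_size ≥ 1 under Pre_, so the shift is 2 ^ word_size
  let mask : Int := 2 ^ word_size.toNat - 1
  -- total ≥ 0 always holds here, so Python's 'total >> word_size' and 'total & mask' are exactly
  -- floor division and remainder by 2 ^ word_size
  let total2 := if total > mask
    then PySem.Int.floordiv total (2 ^ word_size.toNat) + PySem.Int.mod total (2 ^ word_size.toNat)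
    else total
  if total2 = mask then "Valid" else "Invalid"

-- ===== PRECONDITION & SPEC =====
-- Pre_ requires word_size ≥ 1 (A raises ValueError for word_size ≤ 0) and a codeword made only of
-- '0'/'1' characters: on other codewords A usually raises ValueError in int(chunk, 2); Pre_ also
-- excludes the rare chunk-parseable forms ('+1', ' 1', '1_0') on which A returns a value but B's
-- per-character int(ch, 2) raises.
def Pre_Checksum_check (codeword : String) (word_size : Int) (num_blocks : Int) : Prop :=
  1 ≤ word_size ∧ codeword.toList.all (fun c => c == '0' || c == '1') = true
instance (codeword : String) (word_size : Int) (num_blocks : Int) : Decidable (Pre_Checksum_check codeword word_size num_blocks) := by unfold Pre_Checksum_check; infer_instance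

def pvWitness_Checksum_check : String × Int × Int := ("1", 1, 1)

def Spec_Checksum_check (codeword : String) (word_size : Int) (num_blocks : Int) (out : String) : Prop := out = Checksum_check_alt codeword word_size num_blocks
instance (codeword : String) (word_size : Int) (num_blocks : Int) (out : String) : Decidable (Spec_Checksum_check codeword word_size num_blocks out) := by unfold Spec_Checksum_check; infer_instance

-- ===== CLAIM (what is proved, stated in full; the proofs are below) =====
def Claim_equal_Checksum_check : Prop := ∀ (codeword : String) (word_size : Int) (num_blocks : Int), Dom_Checksum_check codeword word_size num_blocks → Pre_Checksum_check codeword word_size num_blocks → Spec_Checksum_check codeword word_size num_blocks (Checksum_check codeword word_size num_blocks)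

-- ===== LEMMAS AND PROOFS =====
-- Nat digit value of a binary string (proof-side mirror of pvIntBin)
def pvNval (s : List Char) : Nat :=
  s.foldl (fun a c => 2 * a + (if c = '1' then 1 else 0)) 0

lemma pvNval_go (l : List Char) : ∀ a : Nat,
    l.foldl (fun a c => 2 * a + (if c = '1' then 1 else 0)) a = a * 2 ^ l.length + pvNval l := by
  induction l with
  | nil => intro a; simp [pvNval]
  | cons c l ih =>
    intro a
    simp only [List.foldl_cons, List.length_cons, pvNval]
    rw [ih, ih (2 * 0 + (if c = '1' then 1 else 0))]
    ring

lemma pvNval_cons (c : Char) (l : List Char) :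
    pvNval (c :: l) = (if c = '1' then 1 else 0) * 2 ^ l.length + pvNval l := by
  simp only [pvNval, List.foldl_cons]
  rw [pvNval_go]
  norm_num
  rfl

lemma pvIntBin_eq_aux (l : List Char) : ∀ a : Nat,
    l.foldl (fun a c => 2 * a + (if c = '1' then 1 else 0)) (a : Int)
      = ((l.foldl (fun a c => 2 * a + (if c = '1' then 1 else 0)) a : Nat) : Int) := by
  induction l with
  | nil => intro a; simp
  | cons c l ih =>
    intro a
    simp only [List.foldl_cons]
    have : (2 * (a : Int) + (if c = '1' then 1 else 0))
        = ((2 * a + (if c = '1' then 1 else 0) : Nat) : Int) := by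
      split <;> push_cast <;> ring
    rw [this, ih]

lemma pvIntBin_eq (l : List Char) : pvIntBin l = (pvNval l : Int) := by
  have := pvIntBin_eq_aux l 0
  simpa [pvIntBin, pvNval] using this

lemma pvNval_append (l₁ l₂ : List Char) :
    pvNval (l₁ ++ l₂) = pvNval l₁ * 2 ^ l₂.length + pvNval l₂ := by
  simp only [pvNval, List.foldl_append]
  rw [pvNval_go l₂]
  rfl

lemma pvNval_lt (l : List Char) : pvNval l < 2 ^ l.length := by
  induction l with
  | nil => simp [pvNval]
  | cons c l ih =>
    rw [pvNval_cons]
    have : (if c = '1' then 1 else 0) ≤ 1 := by split <;> omega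
    have h2 : (if c = '1' then (1:Nat) else 0) * 2 ^ l.length ≤ 2 ^ l.length := by
      calc (if c = '1' then (1:Nat) else 0) * 2 ^ l.length ≤ 1 * 2 ^ l.length :=
            Nat.mul_le_mul_right _ this
        _ = 2 ^ l.length := one_mul _
    simp only [List.length_cons, pow_succ]
    omega

lemma pvNval_pvBin (n : Nat) : pvNval (pvBin n) = n := by
  induction n using pvBin.induct with
  | case1 n h =>
    rw [pvBin]
    simp only [dif_pos h]
    interval_cases n <;> simp [pvNval_cons, pvNval]
  | case2 n h ih =>
    rw [pvBin]
    simp only [dif_neg h]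
    rw [pvNval_append, ih]
    have : pvNval [if n % 2 = 1 then '1' else '0'] = n % 2 := by
      rcases Nat.mod_two_eq_zero_or_one n with h2 | h2 <;> simp [h2, pvNval_cons, pvNval]
    simp only [List.length_cons, List.length_nil, this]
    omega

lemma pvBin_len_pos (n : Nat) : 1 ≤ (pvBin n).length := by
  rw [pvBin]
  split <;> simp

lemma pvBin_lower (n : Nat) (h : 1 ≤ n) : 2 ^ ((pvBin n).length - 1) ≤ n := by
  induction n using pvBin.induct with
  | case1 n hlt =>
    rw [pvBin]
    simp only [dif_pos hlt]
    interval_cases n <;> simp_all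
  | case2 n hlt ih =>
    rw [pvBin]
    simp only [dif_neg hlt, List.length_append, List.length_cons, List.length_nil]
    have hd : 1 ≤ n / 2 := by omega
    have hih := ih hd
    have hL : 1 ≤ (pvBin (n / 2)).length := pvBin_len_pos _
    set L := (pvBin (n / 2)).length with hLdef
    have hpow : (2:Nat) ^ L = 2 * 2 ^ (L - 1) := by
      conv_lhs => rw [show L = (L - 1) + 1 by omega]
      rw [pow_succ]; ring
    have hgoal : L + (0 + 1) - 1 = L := by omega
    simp only [hgoal]
    omega

lemma pvBin_digits (n : Nat) : ∀ c ∈ pvBin n, c = '0' ∨ c = '1' := by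
  induction n using pvBin.induct with
  | case1 n h =>
    rw [pvBin]; simp only [dif_pos h]
    intro c hc
    simp only [List.mem_singleton] at hc
    subst hc; split <;> simp
  | case2 n h ih =>
    rw [pvBin]; simp only [dif_neg h]
    intro c hc
    rcases List.mem_append.mp hc with h1 | h1
    · exact ih c h1
    · simp only [List.mem_singleton] at h1; subst h1; split <;> simp

lemma pvNval_rep0 (k : Nat) : pvNval (List.replicate k '0') = 0 := by
  induction k with
  | zero => simp [pvNval]
  | succ k ih => rw [List.replicate_succ, pvNval_cons]; simp [ih]

lemma pvNval_rep1 (k : Nat) : pvNval (List.replicate k '1') = 2 ^ k - 1 := by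
  induction k with
  | zero => simp [pvNval]
  | succ k ih =>
    have h1 : 1 ≤ 2 ^ k := Nat.one_le_two_pow (n := k)
    rw [List.replicate_succ, pvNval_cons, ih]
    norm_num [List.length_replicate, pow_succ]
    omega

lemma pvBin_ones (k : Nat) (h : 1 ≤ k) : pvBin (2 ^ k - 1) = List.replicate k '1' := by
  induction k with
  | zero => omega
  | succ k ih =>
    rcases Nat.eq_zero_or_pos k with hk | hk
    · subst hk
      rw [show (2:Nat) ^ (0 + 1) - 1 = 1 by norm_num, pvBin]
      norm_num
    · have h2 : (2:Nat) ^ (k + 1) = 2 * 2 ^ k := by rw [pow_succ]; ring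
      have h1 : (2:Nat) ≤ 2 ^ k := by
        calc (2:Nat) = 2 ^ 1 := (pow_one 2).symm
          _ ≤ 2 ^ k := Nat.pow_le_pow_right (by omega) hk
      rw [pvBin]
      have hge : ¬ (2 ^ (k + 1) - 1 < 2) := by omega
      simp only [dif_neg hge]
      have hdiv : (2 ^ (k + 1) - 1) / 2 = 2 ^ k - 1 := by omega
      have hmod : (2 ^ (k + 1) - 1) % 2 = 1 := by omega
      rw [hdiv, hmod, ih hk]
      simp [List.replicate_succ']

lemma pvPad_eq (k : Nat) : ∀ l, pvPad k l = List.replicate k '0' ++ l := by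
  induction k with
  | zero => intro l; simp [pvPad]
  | succ k ih =>
    intro l
    rw [pvPad, ih, List.replicate_succ']
    simp

lemma compFold (l : List Char) : ∀ init : List Char,
    l.foldl (fun acc b => acc ++ [if b = '1' then '0' else '1']) init
      = init ++ l.map (fun b => if b = '1' then '0' else '1') := by
  induction l with
  | nil => intro init; simp
  | cons c l ih => intro init; simp [ih]

lemma flip_eq (l : List Char) : ∀ ws : Nat, (∀ c ∈ l, c = '0' ∨ c = '1') →
    ((l.map (fun b => if b = '1' then '0' else '1') = List.replicate ws '0')
      ↔ l = List.replicate ws '1') := by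
  induction l with
  | nil =>
    intro ws _
    cases ws <;> simp [List.replicate_succ]
  | cons c l ih =>
    intro ws hd
    cases ws with
    | zero => simp
    | succ ws =>
      simp only [List.map_cons, List.replicate_succ, List.cons_eq_cons]
      rw [ih ws (fun c hc => hd c (List.mem_cons_of_mem _ hc))]
      have : ((if c = '1' then '0' else '1') = '0') ↔ c = '1' := by
        rcases hd c List.mem_cons_self with h | h <;> subst h <;> simp
      rw [this]

lemma valid_iff (w m : Nat) (hw : 1 ≤ w) :
    ((pvPad (w - (pvBin m).length) (pvBin m)).foldl
        (fun acc b => acc ++ [if b = '1' then '0' else '1']) []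
      = List.replicate w '0') ↔ m = 2 ^ w - 1 := by
  rw [compFold, List.nil_append, pvPad_eq]
  rw [flip_eq]
  · constructor
    · intro h
      have := congrArg pvNval h
      rw [pvNval_append, pvNval_rep0, pvNval_rep1, pvNval_pvBin] at this
      simpa using this
    · intro h
      subst h
      rw [pvBin_ones w hw]
      simp
  · intro c hc
    rcases List.mem_append.mp hc with h | h
    · left; exact List.eq_of_mem_replicate h
    · exact pvBin_digits m c h

lemma len_le_iff (w m : Nat) (hw : 1 ≤ w) : (pvBin m).length ≤ w ↔ m < 2 ^ w := by
  constructor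
  · intro h
    calc m = pvNval (pvBin m) := (pvNval_pvBin m).symm
      _ < 2 ^ (pvBin m).length := pvNval_lt _
      _ ≤ 2 ^ w := Nat.pow_le_pow_right (by omega) h
  · intro h
    by_contra hlt
    push_neg at hlt
    rcases Nat.eq_zero_or_pos m with hm | hm
    · subst hm
      have : (pvBin 0).length = 1 := by simp [pvBin, pvNval]
      omega
    · have h1 := pvBin_lower m hm
      have : 2 ^ w ≤ 2 ^ ((pvBin m).length - 1) := Nat.pow_le_pow_right (by omega) (by omega)
      omega

lemma split_vals (w m : Nat) (h : w < (pvBin m).length) :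
    pvNval ((pvBin m).take ((pvBin m).length - w)) = m / 2 ^ w ∧
    pvNval ((pvBin m).drop ((pvBin m).length - w)) = m % 2 ^ w := by
  set b := pvBin m with hb
  set k := b.length - w with hk
  have hdl : (b.drop k).length = w := by
    rw [List.length_drop]; omega
  have hsplit : b = b.take k ++ b.drop k := (List.take_append_drop k b).symm
  have hm : m = pvNval (b.take k) * 2 ^ w + pvNval (b.drop k) := by
    conv_lhs => rw [← pvNval_pvBin m, ← hb, hsplit]
    rw [pvNval_append, hdl]
  have hlt : pvNval (b.drop k) < 2 ^ w := by
    have := pvNval_lt (b.drop k)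
    rwa [hdl] at this
  have hpos : 0 < 2 ^ w := pow_pos (by omega) w
  have hcomm : pvNval (b.take k) * 2 ^ w + pvNval (b.drop k)
      = 2 ^ w * pvNval (b.take k) + pvNval (b.drop k) := by ring
  constructor
  · rw [hm, hcomm, Nat.mul_add_div hpos, Nat.div_eq_of_lt hlt]
    omega
  · rw [hm, hcomm, Nat.mul_add_mod, Nat.mod_eq_of_lt hlt]

lemma pvNval_0b (l : List Char) : pvNval ('0' :: 'b' :: l) = pvNval l := by
  rw [pvNval_cons, pvNval_cons]
  simp

lemma foldA' (l : List (List Char)) : ∀ m : Nat,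
    List.foldl (fun s data => '0' :: 'b' :: pvBin (pvIntBin s + pvIntBin data).toNat)
      ('0' :: 'b' :: pvBin m) l = '0' :: 'b' :: pvBin (m + (l.map pvNval).sum) := by
  induction l with
  | nil => intro m; simp
  | cons d l ih =>
    intro m
    simp only [List.foldl_cons]
    have hstep : ('0' :: 'b' :: pvBin (pvIntBin ('0' :: 'b' :: pvBin m) + pvIntBin d).toNat)
        = '0' :: 'b' :: pvBin (m + pvNval d) := by
      rw [pvIntBin_eq, pvIntBin_eq, pvNval_0b, pvNval_pvBin]
      norm_cast
    rw [hstep, ih]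
    simp only [List.map_cons, List.sum_cons]
    congr 3
    omega

lemma foldA (d : List Char) (rest : List (List Char)) (s : List Char) :
    List.foldl (fun s data => '0' :: 'b' :: pvBin (pvIntBin s + pvIntBin data).toNat) s (d :: rest)
      = '0' :: 'b' :: pvBin (pvNval s + ((d :: rest).map pvNval).sum) := by
  simp only [List.foldl_cons]
  have hstep : ('0' :: 'b' :: pvBin (pvIntBin s + pvIntBin d).toNat)
      = '0' :: 'b' :: pvBin (pvNval s + pvNval d) := by
    rw [pvIntBin_eq, pvIntBin_eq]; norm_cast
  rw [hstep, foldA' rest (pvNval s + pvNval d)]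
  simp only [List.map_cons, List.sum_cons]
  congr 3
  omega

lemma A_tail (w m : Nat) (hw : 1 ≤ w) :
    (if (pvPad (w - (pvBin m).length) (pvBin m)).foldl
          (fun acc b => acc ++ [if b = '1' then '0' else '1']) []
        = List.replicate w '0' then "Valid" else "Invalid")
      = (if m = 2 ^ w - 1 then "Valid" else "Invalid") :=
  if_congr (valid_iff w m hw) rfl rfl

-- ---- chunk decomposition shared by the two sides of the proof ----
-- the successive word_size-slices of cs, last one possibly shorter
def pvChunks (w : Nat) (cs : List Char) : List (List Char) :=
  if h : w = 0 ∨ cs = [] then [] else cs.take w :: pvChunks w (cs.drop w)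
termination_by cs.length
decreasing_by
  rcases not_or.mp h with ⟨hw, hcs⟩
  have h1 : 0 < cs.length := List.length_pos_iff.mpr hcs
  have h2 : (cs.drop w).length = cs.length - w := List.length_drop
  omega

lemma pyRange_pos_cons (a b s : Int) (hs : 0 < s) (hab : a < b) :
    PySem.List.pyRange a b s = a :: PySem.List.pyRange (a + s) b s := by
  rw [PySem.List.pyRange_of_pos _ _ hs, PySem.List.pyRange_of_pos _ _ hs]
  rw [if_pos hab]
  by_cases h2 : a + s < b
  · rw [if_pos h2]
    have hdiv : (b - a + s - 1) / s = (b - (a + s) + s - 1) / s + 1 := by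
      have h1 : b - a + s - 1 = (b - (a + s) + s - 1) + 1 * s := by ring
      rw [h1, Int.add_mul_ediv_right _ _ (by omega : s ≠ 0)]
    have hnn : 0 ≤ (b - (a + s) + s - 1) / s := by
      apply Int.ediv_nonneg <;> omega
    have htn : ((b - a + s - 1) / s).toNat = ((b - (a + s) + s - 1) / s).toNat + 1 := by
      omega
    rw [htn, List.range_succ_eq_map]
    simp only [List.map_cons, List.map_map]
    congr 1
    · push_cast
      ring
    · apply List.map_congr_left
      intro k _
      simp only [Function.comp_apply, Nat.succ_eq_add_one]
      push_cast
      ring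
  · rw [if_neg h2]
    have hd : b - a - 1 < s := by omega
    have hdiv : (b - a + s - 1) / s = 1 := by
      have h1 : b - a + s - 1 = (b - a - 1) + 1 * s := by ring
      rw [h1, Int.add_mul_ediv_right _ _ (by omega : s ≠ 0)]
      rw [Int.ediv_eq_zero_of_lt (by omega) hd]
      norm_num
    rw [hdiv]
    simp

lemma pyRange_shift (n w : Int) (hw : 0 < w) :
    PySem.List.pyRange w n w = (PySem.List.pyRange 0 (n - w) w).map (· + w) := by
  rw [PySem.List.pyRange_of_pos _ _ hw, PySem.List.pyRange_of_pos _ _ hw]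
  have hn : (if 0 < n - w then ((n - w - 0 + w - 1) / w).toNat else 0)
      = (if w < n then ((n - w + w - 1) / w).toNat else 0) := by
    split_ifs with h1 h2
    · congr 1
      ring
    · omega
    · omega
    · rfl
  rw [hn]
  simp only [List.map_map]
  apply List.map_congr_left
  intro k _
  simp only [Function.comp_apply]
  ring

-- A's list comprehension 'codeword[i:i+word_size] for i in range(0, len, word_size)' IS pvChunks
lemma chunks_eq (w : Nat) (hw : 1 ≤ w) (cs : List Char) :
    (PySem.List.pyRange 0 cs.length (w : Int)).map
        (fun i => PySem.List.slice cs (some i) (some (i + (w : Int)))) = pvChunks w cs := by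
  induction cs using pvChunks.induct w with
  | case1 cs h =>
    rcases h with h | h
    · omega
    · subst h
      rw [pvChunks]
      simp [PySem.List.pyRange_of_pos _ _ (by exact_mod_cast hw : (0:Int) < (w:Int))]
  | case2 cs h ih =>
    rcases not_or.mp h with ⟨_, hcs⟩
    have hlen : 0 < cs.length := List.length_pos_iff.mpr hcs
    have hwpos : (0:Int) < (w:Int) := by exact_mod_cast hw
    rw [pvChunks, dif_neg h]
    rw [pyRange_pos_cons 0 cs.length w hwpos (by exact_mod_cast hlen)]
    simp only [List.map_cons, zero_add]
    congr 1
    · -- head: cs[0 : w] = cs.take w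
      have := PySem.List.slice_natCast_add cs 0 w
      simpa using this
    · -- tail
      by_cases hcw : cs.length ≤ w
      · have hdrop : cs.drop w = [] := List.drop_eq_nil_of_le hcw
        have hr : PySem.List.pyRange (w : Int) cs.length (w : Int) = [] := by
          rw [PySem.List.pyRange_of_pos _ _ hwpos,
            if_neg (by exact_mod_cast not_lt.mpr hcw)]
          simp
        rw [hr, hdrop, pvChunks]
        simp
      · push_neg at hcw
        rw [pyRange_shift _ _ hwpos, List.map_map]
        rw [← ih]
        have hlen' : ((cs.drop w).length : Int) = (cs.length : Int) - w := by
          simp only [List.length_drop]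
          omega
        rw [hlen']
        apply List.map_congr_left
        intro i hi
        have hi0 : 0 ≤ i := by
          rcases (PySem.List.mem_pyRange_iff_of_pos hwpos i).mp hi with ⟨h1, _, _⟩
          omega
        obtain ⟨j, rfl⟩ : ∃ j : Nat, i = (j : Int) := ⟨i.toNat, by omega⟩
        simp only [Function.comp_apply]
        have h1 : (j : Int) + (w : Int) = ((j + w : Nat) : Int) := by push_cast; ring
        rw [h1, PySem.List.slice_natCast_add cs (j + w) w,
          PySem.List.slice_natCast (cs.drop w) j (j + w)]
        rw [List.drop_drop]
        have hco : w + j = j + w := Nat.add_comm w j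
        rw [hco]
        congr 1
        omega

-- ---- B's streaming fold, characterised chunkwise ----
-- (sum of the full chunks of cs, trailing partial chunk)
def pvBtot (w : Nat) (cs : List Char) : Nat × List Char :=
  if h : w = 0 ∨ cs.length < w then (0, cs)
  else
    let r := pvBtot w (cs.drop w)
    (pvNval (cs.take w) + r.1, r.2)
termination_by cs.length
decreasing_by
  rcases not_or.mp h with ⟨hw, hcs⟩
  have h2 : (cs.drop w).length = cs.length - w := List.length_drop
  omega

lemma pvBtot_rem_lt (w : Nat) (hw : 1 ≤ w) (cs : List Char) : (pvBtot w cs).2.length < w := by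
  induction cs using pvBtot.induct w with
  | case1 cs h =>
    rw [pvBtot, dif_pos h]
    rcases h with h | h
    · omega
    · exact h
  | case2 cs h ih =>
    rw [pvBtot, dif_neg h]
    exact ih

lemma bfold_chunks (w : Nat) (hw : 1 ≤ w) (cs : List Char) : ∀ (t : Nat) (p : List Char),
    p.length < w →
    cs.foldl (pvBStep (w : Int)) ((t : Int), (pvNval p : Int), (p.length : Int))
      = (((t + (pvBtot w (p ++ cs)).1 : Nat) : Int), (pvNval (pvBtot w (p ++ cs)).2 : Int),
         ((pvBtot w (p ++ cs)).2.length : Int)) := by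
  induction cs with
  | nil =>
    intro t p hp
    have : pvBtot w p = (0, p) := by
      rw [pvBtot, dif_pos (Or.inr hp)]
    simp [this]
  | cons c cs ih =>
    intro t p hp
    simp only [List.foldl_cons]
    have hcur : (pvNval p : Int) * 2 + (if c = '1' then 1 else 0)
        = (pvNval (p ++ [c]) : Int) := by
      rw [pvNval_append]
      have : pvNval [c] = if c = '1' then 1 else 0 := by
        simp [pvNval]
      rw [this]
      simp only [List.length_cons, List.length_nil, pow_one]
      split <;> push_cast <;> ring
    have hone : pvIntBin [c] = if c = '1' then 1 else 0 := by
      simp [pvIntBin]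
    have hstep : pvBStep (w : Int) ((t : Int), (pvNval p : Int), (p.length : Int)) c
        = if ((p.length : Int) + 1) = (w : Int)
          then ((t : Int) + (pvNval (p ++ [c]) : Int), 0, 0)
          else ((t : Int), (pvNval (p ++ [c]) : Int), (p.length : Int) + 1) := by
      simp only [pvBStep, hone, hcur]
    rw [hstep]
    by_cases hful : p.length + 1 = w
    · have hcond : ((p.length : Int) + 1) = (w : Int) := by exact_mod_cast hful
      rw [if_pos hcond]
      have hts : ((t : Int) + (pvNval (p ++ [c]) : Int))
          = (((t + pvNval (p ++ [c]) : Nat)) : Int) := by push_cast; ring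
      rw [hts]
      have hih := ih (t + pvNval (p ++ [c])) [] (by simp only [List.length_nil]; omega)
      simp only [show pvNval ([] : List Char) = 0 from rfl, List.length_nil, Nat.cast_zero,
        List.nil_append] at hih
      rw [hih]
      have hsplit : pvBtot w (p ++ c :: cs)
          = (pvNval (p ++ [c]) + (pvBtot w cs).1, (pvBtot w cs).2) := by
        have hlen : w ≤ (p ++ c :: cs).length := by
          simp only [List.length_append, List.length_cons]
          omega
        rw [pvBtot, dif_neg (by push_neg; exact ⟨by omega, by omega⟩)]
        have hassoc : p ++ c :: cs = (p ++ [c]) ++ cs := by simp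
        have htake : (p ++ c :: cs).take w = p ++ [c] := by
          rw [hassoc, List.take_append_of_le_length (by simp; omega)]
          apply List.take_of_length_le
          simp; omega
        have hdrop : (p ++ c :: cs).drop w = cs := by
          rw [hassoc, List.drop_append_of_le_length (by simp; omega)]
          have : (p ++ [c]).drop w = [] := by
            apply List.drop_eq_nil_of_le
            simp; omega
          simp [this]
        rw [htake, hdrop]
      rw [hsplit]
      have hassoc2 : t + pvNval (p ++ [c]) + (pvBtot w cs).1
          = t + (pvNval (p ++ [c]) + (pvBtot w cs).1) := by omega
      rw [hassoc2]
    · have hcond : ¬ (((p.length : Int) + 1) = (w : Int)) := by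
        intro hx
        exact hful (by exact_mod_cast hx)
      rw [if_neg hcond]
      have h1 : (p.length : Int) + 1 = ((p ++ [c]).length : Int) := by
        simp
      rw [h1, ih t (p ++ [c]) (by simp; omega)]
      have : p ++ [c] ++ cs = p ++ c :: cs := by simp
      rw [this]

-- (full-chunk sum) + (partial-chunk value) = sum over all chunks (A's chunk values)
lemma btot_eq_chunkSum (w : Nat) (hw : 1 ≤ w) (cs : List Char) :
    (pvBtot w cs).1 + pvNval (pvBtot w cs).2 = ((pvChunks w cs).map pvNval).sum := by
  induction cs using pvBtot.induct w with
  | case1 cs h =>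
    rw [pvBtot, dif_pos h]
    rcases h with h | h
    · omega
    · by_cases hnil : cs = []
      · subst hnil
        rw [pvChunks]
        simp [pvNval]
      · rw [pvChunks, dif_neg (by push_neg; exact ⟨by omega, hnil⟩)]
        have htake : cs.take w = cs := List.take_of_length_le (by omega)
        have hdrop : cs.drop w = [] := List.drop_eq_nil_of_le (by omega)
        rw [htake, hdrop, pvChunks]
        simp
  | case2 cs h ih =>
    rcases not_or.mp h with ⟨hw0, hlen⟩
    push_neg at hlen
    have hnil : cs ≠ [] := by
      intro hx
      subst hx
      simp at hlen
      omega
    rw [pvBtot, dif_neg h, pvChunks, dif_neg (by push_neg; exact ⟨hw0, hnil⟩)]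
    simp only [List.map_cons, List.sum_cons]
    omega

lemma ports_agree (codeword : String) (ws nb : Int)
    (hpre : 1 ≤ ws)
    (hbin : codeword.toList.all (fun c => c == '0' || c == '1') = true) :
    Checksum_check codeword ws nb = Checksum_check_alt codeword ws nb := by
  obtain ⟨w, rfl⟩ : ∃ w : Nat, ws = (w : Int) := ⟨ws.toNat, by omega⟩
  have hw : 1 ≤ w := by exact_mod_cast hpre
  have h2w : (2:Nat) ≤ 2 ^ w := by
    calc (2:Nat) = 2 ^ 1 := (pow_one 2).symm
      _ ≤ 2 ^ w := Nat.pow_le_pow_right (by omega) hw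
  have hbase : ((2:Int)) ^ w = ((2 ^ w : Nat) : Int) := by push_cast; ring
  simp only [Checksum_check, Checksum_check_alt, Int.toNat_natCast]
  set cs := codeword.toList with hcs
  -- B side: the streaming fold computes the chunk sum
  have hB := bfold_chunks w hw cs 0 [] (by simpa using hw)
  simp only [show pvNval ([] : List Char) = 0 from rfl, List.length_nil, Nat.cast_zero,
    List.nil_append] at hB
  rw [hB]
  -- A side: rewrite temp to pvChunks
  rw [chunks_eq w hw cs]
  set T : Nat := ((pvChunks w cs).map pvNval).sum with hT
  have hTot := btot_eq_chunkSum w hw cs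
  have hrem := pvBtot_rem_lt w hw cs
  set S := (pvBtot w cs).1 with hS
  set rem := (pvBtot w cs).2 with hrem2
  -- B's re-assembled total is T
  have hBtotal : (if ((rem.length : Nat) : Int) > 0
        then ((0 + S : Nat) : Int) + (pvNval rem : Int) else ((0 + S : Nat) : Int))
      = (T : Int) := by
    by_cases hr : rem.length = 0
    · have hnil : rem = [] := List.eq_nil_of_length_eq_zero hr
      rw [if_neg (by simp [hr])]
      have h0 : pvNval rem = 0 := by rw [hnil]; rfl
      omega
    · rw [if_pos (by exact_mod_cast Nat.pos_of_ne_zero hr)]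
      push_cast
      omega
  rw [hBtotal]
  have hdrop0b : ∀ l : List Char, PySem.List.slice ('0' :: 'b' :: l) (some 2) none = l := by
    intro l
    rw [PySem.List.slice_from _ (show (0:Int) ≤ 2 by norm_num)]
    rfl
  -- B's tail comparisons, shared by both chunk cases
  have hmask : ((2:Int) ^ w - 1) = (((2 ^ w - 1 : Nat)) : Int) := by
    rw [hbase]; push_cast [Nat.one_le_two_pow]; omega
  cases hchunks : pvChunks w cs with
  | nil =>
    -- cs = []: A sums nothing, B's total is 0
    have hT0 : T = 0 := by rw [hT, hchunks]; simp
    simp only [List.foldl_nil]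
    have hdrop : PySem.List.slice (List.replicate w '0') (some 2) none
        = List.replicate (w - 2) '0' := by
      rw [PySem.List.slice_from _ (show (0:Int) ≤ 2 by norm_num)]
      rw [show Int.toNat 2 = 2 from rfl, List.drop_replicate]
    rw [hdrop]
    have hcond : ¬ (((List.replicate (w - 2) '0').length : Int) > (w : Int)) := by
      simp only [List.length_replicate]
      omega
    rw [if_neg hcond]
    rw [pvPad_eq, compFold]
    simp only [List.length_replicate, List.map_replicate, List.nil_append]
    have hjoin : List.replicate (w - (w - 2)) '0' ++ List.replicate (w - 2) '0'
        = List.replicate w '0' := by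
      rw [← List.replicate_add]
      congr 1
      omega
    rw [hjoin, List.map_replicate]
    have hne : List.replicate w (if ('0':Char) = '1' then '0' else '1') ≠ List.replicate w '0' := by
      intro h
      have h0 := congrArg pvNval h
      simp only [show (if ('0':Char) = '1' then '0' else '1') = '1' from rfl] at h0
      rw [pvNval_rep1, pvNval_rep0] at h0
      omega
    rw [if_neg hne]
    have hcondB : ¬ ((T : Int) > (2:Int) ^ w - 1) := by
      rw [hT0, hbase]
      have : (2:Int) ≤ ((2^w : Nat) : Int) := by exact_mod_cast h2w
      push_cast
      omega
    rw [if_neg hcondB]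
    have hneB : ¬ ((T : Int) = 2 ^ w - 1) := by
      rw [hT0, hbase]
      have : (2:Int) ≤ ((2^w : Nat) : Int) := by exact_mod_cast h2w
      omega
    rw [if_neg hneB]
  | cons d rest =>
    rw [foldA d rest, pvNval_rep0]
    simp only [Nat.zero_add, zero_add]
    rw [hdrop0b]
    have hTd : pvNval d + ((rest.map pvNval).sum) = T := by
      rw [hT, hchunks]
      simp
    rw [show (List.map pvNval (d :: rest)).sum = T by rw [← hTd]; simp]
    by_cases hTlt : T < 2 ^ w
    · have hL : (pvBin T).length ≤ w := (len_le_iff w T hw).mpr hTlt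
      have hcond : ¬ (((pvBin T).length : Int) > (w : Int)) := by
        push_cast
        omega
      rw [if_neg hcond, A_tail w T hw]
      have hcondB : ¬ ((T : Int) > (2:Int) ^ w - 1) := by
        rw [hbase]
        push_cast
        omega
      rw [if_neg hcondB]
      refine if_congr ?_ rfl rfl
      rw [hbase]
      have hX2 : 2 ≤ 2 ^ w := h2w
      generalize (2:Nat) ^ w = X at hX2 hTlt ⊢
      omega
    · push_neg at hTlt
      have hLgt : w < (pvBin T).length := by
        by_contra hle
        push_neg at hle
        exact absurd ((len_le_iff w T hw).mp hle) (by omega)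
      have hcond : ((pvBin T).length : Int) > (w : Int) := by
        push_cast
        omega
      rw [if_pos hcond]
      have hlen : ((pvBin T).length : Int) - (w : Int) = (((pvBin T).length - w : Nat) : Int) := by
        push_cast
        omega
      rw [hlen, PySem.List.slice_from_natCast, PySem.List.slice_to_natCast]
      obtain ⟨hdivv, hmodv⟩ := split_vals w T hLgt
      have hval : (pvIntBin ((pvBin T).drop ((pvBin T).length - w))
            + pvIntBin ((pvBin T).take ((pvBin T).length - w))).toNat
          = T % 2 ^ w + T / 2 ^ w := by
        rw [pvIntBin_eq, pvIntBin_eq, hdivv, hmodv]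
        omega
      rw [hval, hdrop0b, A_tail w (T % 2 ^ w + T / 2 ^ w) hw]
      have hcondB : (T : Int) > (2:Int) ^ w - 1 := by
        rw [hbase]
        push_cast
        omega
      rw [if_pos hcondB]
      have hfd : PySem.Int.floordiv (T : Int) (((2 ^ w : Nat)) : Int)
            + PySem.Int.mod (T : Int) (((2 ^ w : Nat)) : Int)
          = ((T / 2 ^ w + T % 2 ^ w : Nat) : Int) := by
        rw [PySem.Int.floordiv_natCast, PySem.Int.mod_natCast]
        push_cast
        ring
      rw [show ((2:Int) ^ w) = (((2 ^ w : Nat)) : Int) from hbase] at *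
      rw [hfd]
      refine if_congr ?_ rfl rfl
      have hX2 : 2 ≤ 2 ^ w := h2w
      generalize T % 2 ^ w = a at ⊢
      generalize T / 2 ^ w = b at ⊢
      generalize (2:Nat) ^ w = X at hX2 ⊢
      omega

-- ===== VERDICT (by name: the statement is the Claim_ definition above) =====
theorem Checksum_check_spec : Claim_equal_Checksum_check := by
  intro codeword ws nb _ hpre
  unfold Spec_Checksum_check
  exact ports_agree codeword ws nb hpre.1 hpre.2
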